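-- pv_equiv track=rewrite | github.com/MrBrantCode/unitest_baseline | mut_generate/mist_train_cf/cf_44945/solution.py | maximumSizeOfSet
-- ===== SOURCE A (Python) =====
-- import heapq
--
-- def maximumSizeOfSet(intervals):
--     # Initialize S as an empty priority queue
--     S = []
--
--     # Sort the intervals by the start point
--     intervals.sort()
--
--     # For each interval
--     for start, end in intervals:
--         if S and S[0] < start:
--             # If the smallest element in S is less than start,
--             # pop it until it is not smaller than start.
--             heapq.heappop(S)
--
--         if len(S) < 2:
--             # If the queue size is 0 or 1, then push end into the priority queue.
--             heapq.heappush(S, end)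
--         elif S[0] < end:
--             # If the smallest element in S is less than end,
--             # then pop it and push end into the priority queue.
--             heapq.heappop(S)
--             heapq.heappush(S, end)
--
--     # Return the size of S
--     return len(S)
-- ===== SOURCE B (Python) =====
-- def maximumSizeOfSet(intervals):
--     # Sort the intervals in place (same side effect as the original).
--     intervals.sort()
--     if not intervals:
--         return 0
--     # A's heap never holds more than two ends, and once it reaches size 2 it
--     # stays there; so track the single kept end and return 2 at the first
--     # interval that overlaps it.
--     kept = intervals[0][1]
--     for start, end in intervals[1:]:
--         if kept < start:
--             kept = end
--         else:
--             return 2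
--     return 1
-- ===== Notes on version B (the rewrite author's own statement) =====
-- stated objective: simpler
-- what changed: Replaces the 2-element heap whose size is returned by a single kept-end scalar with an early return 2 at the first overlapping interval, using the invariant that A's heap size is monotone and capped at 2.
-- outside the precondition, e.g. on maximumSizeOfSet([[1, 2, 3]]): A raises ValueError, B returns 1
import Mathlib
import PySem

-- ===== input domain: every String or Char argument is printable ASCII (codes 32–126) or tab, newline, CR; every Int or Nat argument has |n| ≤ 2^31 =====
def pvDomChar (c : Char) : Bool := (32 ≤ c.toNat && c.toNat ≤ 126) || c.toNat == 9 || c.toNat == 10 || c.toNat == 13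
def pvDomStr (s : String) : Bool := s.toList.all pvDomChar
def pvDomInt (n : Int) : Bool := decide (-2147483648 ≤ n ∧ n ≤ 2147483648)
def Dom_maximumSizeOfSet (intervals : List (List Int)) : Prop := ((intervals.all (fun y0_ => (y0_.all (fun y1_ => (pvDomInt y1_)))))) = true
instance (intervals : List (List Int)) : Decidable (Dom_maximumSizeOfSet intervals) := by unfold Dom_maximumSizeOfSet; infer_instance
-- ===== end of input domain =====

-- B replaces A's 2-element heap by a single kept end with an early `return 2`; objective: simpler.
-- Both A and B sort `intervals` in place (same side effect); the equivalence proved is about the return value.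

-- ===== PORT A =====
-- heapq modelled exactly for the states this program reaches: the heap never
-- exceeds 2 elements, and a binary heap of ≤ 2 elements is a min-first sorted
-- list, so heappush/heappop below are exact here.
def pvHeapPush (S : List Int) (x : Int) : List Int :=
  match S with
  | [] => [x]
  | [a] => if x < a then [x, a] else [a, x]
  | _ => S ++ [x]   -- unreachable: the program pushes only at size ≤ 1

def pvStepA (S : List Int) (start stop : Int) : List Int :=
  -- if S and S[0] < start: heappop(S)
  let S1 := match S with
    | a :: rest => if a < start then rest else S
    | [] => S
  -- if len(S) < 2: heappush(S, end)  elif S[0] < end: heappop; heappush(S, end)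
  if S1.length < 2 then pvHeapPush S1 stop
  else match S1 with
    | a :: rest => if a < stop then pvHeapPush rest stop else S1
    | [] => S1   -- unreachable: length ≥ 2 here

def maximumSizeOfSet (intervals : List (List Int)) : Int :=
  let sortedIvs := PySem.List.sorted intervals (fun x => x) false
  let S := sortedIvs.foldl (fun S iv =>
    match iv with
    | [start, stop] => pvStepA S start stop
    | _ => S   -- Python raises ValueError here; excluded by Pre_
    ) []
  (S.length : Int)

-- ===== PORT B =====
-- unpacking `start, end = iv`; none when iv is not a pair (Python raises there)
def pvUnpack2 (iv : List Int) : Option (Int × Int) :=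
  match iv with
  | start :: tl =>
    match tl with
    | stop :: tl2 => if tl2.isEmpty then some (start, stop) else none
    | [] => none
  | [] => none

def pvAltLoop (kept : Int) : List (List Int) → Int
  | [] => 1
  | iv :: rest =>
    match pvUnpack2 iv with
    | some (start, stop) => if kept < start then pvAltLoop stop rest else 2
    | none => pvAltLoop kept rest   -- Python raises ValueError here; excluded by Pre_

def maximumSizeOfSet_alt (intervals : List (List Int)) : Int :=
  match PySem.List.sorted intervals (fun x => x) false with
  | [] => 0
  | iv :: rest =>
    match PySem.List.pyGet? iv 1 with   -- intervals[0][1]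
    | some stop => pvAltLoop stop rest
    | none => 0   -- Python raises IndexError here; excluded by Pre_

-- ===== PRECONDITION & SPEC =====
-- Pre_ excludes intervals whose length is not exactly 2: there `for start, end in intervals`
-- (A) and B's unpacking both raise ValueError/IndexError.
def Pre_maximumSizeOfSet (intervals : List (List Int)) : Prop :=
  ∀ iv ∈ intervals, iv.length = 2
instance (intervals : List (List Int)) : Decidable (Pre_maximumSizeOfSet intervals) := by
  unfold Pre_maximumSizeOfSet; infer_instance
def pvWitness_maximumSizeOfSet : List (List Int) := [[1, 3], [2, 4]]

def Spec_maximumSizeOfSet (intervals : List (List Int)) (out : Int) : Prop := out = maximumSizeOfSet_alt intervals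
instance (intervals : List (List Int)) (out : Int) : Decidable (Spec_maximumSizeOfSet intervals out) := by unfold Spec_maximumSizeOfSet; infer_instance

-- ===== CLAIM (what is proved, stated in full; the proofs are below) =====
def Claim_equal_maximumSizeOfSet : Prop := ∀ (intervals : List (List Int)), Dom_maximumSizeOfSet intervals → Pre_maximumSizeOfSet intervals → Spec_maximumSizeOfSet intervals (maximumSizeOfSet intervals)

-- ===== LEMMAS AND PROOFS =====

-- the body of A's fold, named for the lemmas
def pvBodyA (S : List Int) (iv : List Int) : List Int :=
  match iv with
  | [start, stop] => pvStepA S start stop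
  | _ => S

lemma pvBodyA_eq (S : List Int) (iv : List Int) :
    (match iv with | [start, stop] => pvStepA S start stop | _ => S) = pvBodyA S iv := rfl

-- once the heap has two elements, every step keeps it at two elements
lemma pvStepA_len2 (S : List Int) (s e : Int) (h : S.length = 2) :
    (pvStepA S s e).length = 2 := by
  rcases S with _ | ⟨a, _ | ⟨b, _ | ⟨c, t⟩⟩⟩ <;> simp_all [pvStepA, pvHeapPush] <;>
    split_ifs <;> simp_all <;> split_ifs <;> simp

lemma pvBodyA_len2 (S iv : List Int) (h : S.length = 2) : (pvBodyA S iv).length = 2 := by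
  unfold pvBodyA
  rcases iv with _ | ⟨x, _ | ⟨y, _ | _⟩⟩ <;> simp_all [pvStepA_len2]

lemma pvFold_len2 (L : List (List Int)) (S : List Int) (h : S.length = 2) :
    (L.foldl pvBodyA S).length = 2 := by
  induction L generalizing S with
  | nil => simpa
  | cons iv L ih => exact ih _ (pvBodyA_len2 _ _ h)

-- the size-1 heap state [e] corresponds to B's kept end e
lemma pvLoop_agree (L : List (List Int)) (e : Int)
    (hL : ∀ iv ∈ L, iv.length = 2) :
    ((L.foldl pvBodyA [e]).length : Int) = pvAltLoop e L := by
  induction L generalizing e with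
  | nil => rfl
  | cons iv L ih =>
    have hiv : iv.length = 2 := hL iv (List.mem_cons_self ..)
    have hL' : ∀ iv ∈ L, iv.length = 2 := fun x hx => hL x (List.mem_cons_of_mem _ hx)
    rcases iv with _ | ⟨s, _ | ⟨t, _ | _⟩⟩ <;> simp_all
    by_cases h : e < s
    · have hb : pvBodyA [e] [s, t] = [t] := by simp [pvBodyA, pvStepA, pvHeapPush, h]
      rw [hb]
      simpa [pvAltLoop, pvUnpack2, h] using ih t
    · have h2 : (pvBodyA [e] [s, t]).length = 2 := by
        simp [pvBodyA, pvStepA, pvHeapPush, h]; split_ifs <;> simp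
      rw [pvFold_len2 _ _ h2]
      simp [pvAltLoop, pvUnpack2, h]

-- ===== VERDICT (by name: the statement is the Claim_ definition above) =====
theorem maximumSizeOfSet_spec : Claim_equal_maximumSizeOfSet := by
  intro intervals _ hpre
  unfold Spec_maximumSizeOfSet maximumSizeOfSet maximumSizeOfSet_alt
  have hsortPre : ∀ iv ∈ PySem.List.sorted intervals (fun x => x) false, iv.length = 2 := by
    intro iv hiv
    exact hpre iv ((PySem.List.mem_sorted _ _ _ _).1 hiv)
  simp only [pvBodyA_eq]
  rcases hL : PySem.List.sorted intervals (fun x => x) false with _ | ⟨iv, rest⟩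
  · rfl
  · have hiv : iv.length = 2 := hsortPre iv (hL ▸ List.mem_cons_self ..)
    have hrest : ∀ x ∈ rest, x.length = 2 := fun x hx => hsortPre x (hL ▸ List.mem_cons_of_mem _ hx)
    rcases iv with _ | ⟨s, _ | ⟨t, _ | _⟩⟩ <;> simp_all [PySem.List.pyGet?, PySem.List.pyIdx?]
    have h0 : pvBodyA [] [s, t] = [t] := by simp [pvBodyA, pvStepA, pvHeapPush]
    show ((List.foldl pvBodyA (pvBodyA [] [s, t]) rest).length : Int) = _
    rw [h0]
    exact pvLoop_agree rest t hrest
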